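-- pv_equiv track=rewrite | github.com/virendrapatil24/leetcode-solutions | leetcode/1331-path-with-maximum-gold/solution.py | checkIfAllZeros
-- ===== SOURCE A (Python) =====
-- def checkIfAllZeros(grid):
--     count = 0
--     for row in grid:
--         for col in row:
--             if col != 0:
--                 count += col
--             else:
--                 return 0
--     return count
-- ===== SOURCE B (Python) =====
-- def checkIfAllZeros(grid):
--     # Two separate passes: short-circuit zero detection, then pure summation.
--     if any(c == 0 for row in grid for c in row):
--         return 0
--     return sum(sum(row) for row in grid)
-- ===== Notes on version B (the rewrite author's own statement) =====
-- stated objective: simpler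
-- what changed: Replaces A's single fused accumulate-and-early-return nested loop by two separate passes: a short-circuiting any() zero-detection pass followed by a pure nested sum().
import Mathlib
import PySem

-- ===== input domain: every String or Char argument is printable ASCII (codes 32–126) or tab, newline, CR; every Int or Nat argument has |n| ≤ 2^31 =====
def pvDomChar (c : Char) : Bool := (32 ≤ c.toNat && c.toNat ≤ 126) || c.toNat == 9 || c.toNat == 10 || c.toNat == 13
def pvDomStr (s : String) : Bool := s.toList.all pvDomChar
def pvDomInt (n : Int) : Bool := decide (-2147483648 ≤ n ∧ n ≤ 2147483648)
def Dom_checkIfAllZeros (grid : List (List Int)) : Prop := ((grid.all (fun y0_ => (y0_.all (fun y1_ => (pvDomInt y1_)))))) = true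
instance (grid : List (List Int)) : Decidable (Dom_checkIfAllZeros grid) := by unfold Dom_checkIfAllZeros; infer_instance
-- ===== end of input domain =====

-- B splits A's fused accumulate-and-early-return loop into a zero-detection pass then a pure sum (objective: simpler).


-- ===== PORT A =====
-- inner loop over a row: some (updated count), or none = the 'return 0' path
def pvRowLoopA (count : Int) : List Int → Option Int
  | [] => some count
  | c :: cs => if c ≠ 0 then pvRowLoopA (count + c) cs else none

def pvGridLoopA (count : Int) : List (List Int) → Int
  | [] => count
  | r :: rs =>
    match pvRowLoopA count r with
    | some c => pvGridLoopA c rs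
    | none => 0

def checkIfAllZeros (grid : List (List Int)) : Int := pvGridLoopA 0 grid

-- ===== PORT B =====
def checkIfAllZeros_alt (grid : List (List Int)) : Int :=
  if grid.any (fun row => row.any (fun c => c == 0)) then 0
  else (grid.map (fun row => row.sum)).sum

-- ===== PRECONDITION & SPEC =====
def Spec_checkIfAllZeros (grid : List (List Int)) (out : Int) : Prop := out = checkIfAllZeros_alt grid
instance (grid : List (List Int)) (out : Int) : Decidable (Spec_checkIfAllZeros grid out) := by unfold Spec_checkIfAllZeros; infer_instance

-- ===== CLAIM (what is proved, stated in full; the proofs are below) =====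
def Claim_equal_checkIfAllZeros : Prop := ∀ (grid : List (List Int)), Dom_checkIfAllZeros grid → Spec_checkIfAllZeros grid (checkIfAllZeros grid)

-- ===== LEMMAS AND PROOFS =====
theorem pvRowLoopA_char (count : Int) (r : List Int) :
    pvRowLoopA count r = if r.any (fun c => c == 0) then none else some (count + r.sum) := by
  induction r generalizing count with
  | nil => simp [pvRowLoopA]
  | cons c cs ih =>
    simp only [pvRowLoopA, List.any_cons]
    by_cases h : c = 0
    · simp [h]
    · simp [h, ih, add_assoc]

theorem pvGridLoopA_char (count : Int) (g : List (List Int)) :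
    pvGridLoopA count g =
      if g.any (fun row => row.any (fun c => c == 0)) then 0
      else count + (g.map (fun row => row.sum)).sum := by
  induction g generalizing count with
  | nil => simp [pvGridLoopA]
  | cons r rs ih =>
    simp only [pvGridLoopA, pvRowLoopA_char, List.any_cons]
    by_cases h : r.any (fun c => c == 0)
    · simp [h]
    · simp only [h, ih, Bool.false_or]
      by_cases h2 : rs.any (fun row => row.any (fun c => c == 0)) <;> simp [h2] <;> ring

-- ===== VERDICT (by name: the statement is the Claim_ definition above) =====
theorem checkIfAllZeros_spec : Claim_equal_checkIfAllZeros := by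
  intro grid _
  unfold Spec_checkIfAllZeros checkIfAllZeros checkIfAllZeros_alt
  rw [pvGridLoopA_char]
  split_ifs <;> simp
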